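-- pv_equiv track=rewrite | github.com/Dr0x3525/Proyecto-final-programacion | ejercicios_parciales/ejercicio_parcial_2/ejercicio4.py | encontrar_segundo_impar
-- ===== SOURCE A (Python) =====
-- def encontrar_segundo_impar(vector):
--     contado_impares = 0
--     for indice in range(len(vector)):
--         if vector[indice] % 2 != 0:
--             contado_impares += 1
--             if contado_impares == 2:
--                 return vector[indice]
--     return None
-- ===== SOURCE B (Python) =====
-- def encontrar_segundo_impar(vector):
--     impares = [x for x in vector if x % 2 != 0]
--     return impares[1] if len(impares) >= 2 else None
-- ===== Notes on version B (the rewrite author's own statement) =====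
-- stated objective: simpler
-- what changed: Replaces the index-loop with a counter and early return by materializing the list of odd elements with a comprehension and indexing its second element.
import Mathlib
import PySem

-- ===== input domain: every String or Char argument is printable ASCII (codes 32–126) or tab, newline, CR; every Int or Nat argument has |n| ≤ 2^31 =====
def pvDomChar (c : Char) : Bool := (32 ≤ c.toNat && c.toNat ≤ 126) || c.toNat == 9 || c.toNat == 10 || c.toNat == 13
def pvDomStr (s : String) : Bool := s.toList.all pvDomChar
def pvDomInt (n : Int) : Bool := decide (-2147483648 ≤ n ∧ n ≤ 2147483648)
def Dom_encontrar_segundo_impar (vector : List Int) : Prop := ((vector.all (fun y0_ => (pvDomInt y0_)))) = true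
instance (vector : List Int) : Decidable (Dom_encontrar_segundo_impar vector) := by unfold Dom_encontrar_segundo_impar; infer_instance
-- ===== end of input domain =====

-- B replaces A's counter-and-early-return index loop by materializing the full list of odd elements and indexing its second entry (objective: simpler; same cost).


-- ===== PORT A =====
-- Port of A: index loop with a counter and early return.
def pvGoA (vector : List Int) (count : Int) : Option Int :=
  match vector with
  | [] => none
  | x :: rest =>
    if PySem.Int.mod x 2 ≠ 0 then
      if count + 1 == 2 then some x else pvGoA rest (count + 1)
    else pvGoA rest count

def encontrar_segundo_impar (vector : List Int) : Option Int := pvGoA vector 0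

-- ===== PORT B =====
-- Port of B: build the full list of odd elements, then take its second element (none if shorter).
def encontrar_segundo_impar_alt (vector : List Int) : Option Int :=
  let impares := vector.filter (fun x => PySem.Int.mod x 2 ≠ 0)
  if (impares.length : Int) ≥ 2 then PySem.List.pyGet? impares 1 else none

-- ===== PRECONDITION & SPEC =====
def Spec_encontrar_segundo_impar (vector : List Int) (out : Option Int) : Prop := out = encontrar_segundo_impar_alt vector
instance (vector : List Int) (out : Option Int) : Decidable (Spec_encontrar_segundo_impar vector out) := by unfold Spec_encontrar_segundo_impar; infer_instance

-- ===== CLAIM (what is proved, stated in full; the proofs are below) =====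
def Claim_equal_encontrar_segundo_impar : Prop := ∀ (vector : List Int), Dom_encontrar_segundo_impar vector → Spec_encontrar_segundo_impar vector (encontrar_segundo_impar vector)

-- ===== LEMMAS AND PROOFS =====

-- ===== VERDICT (by name: the statement is the Claim_ definition above) =====
lemma pvGoA_eq (vector : List Int) :
    pvGoA vector 0 = encontrar_segundo_impar_alt vector ∧
    pvGoA vector 1 = (vector.filter (fun x => PySem.Int.mod x 2 ≠ 0)).head? := by
  induction vector with
  | nil => simp [pvGoA, encontrar_segundo_impar_alt]
  | cons x rest ih =>
    by_cases hx : x % 2 = 1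
    · refine ⟨?_, ?_⟩
      · have h2 : pvGoA (x :: rest) 0 = pvGoA rest 1 := by
          simp [pvGoA, hx]
        rw [h2, ih.2]
        simp only [encontrar_segundo_impar_alt, List.filter_cons]
        rcases h : rest.filter (fun x => decide (PySem.Int.mod x 2 ≠ 0)) with _ | ⟨y, ys⟩ <;>
          simp_all [PySem.List.pyGet?, PySem.List.pyIdx?]
      · simp [pvGoA, hx]
    · have hx0 : x % 2 = 0 := by omega
      refine ⟨?_, ?_⟩ <;>
        simp [pvGoA, encontrar_segundo_impar_alt, hx0, ih.1, ih.2]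

theorem encontrar_segundo_impar_spec : Claim_equal_encontrar_segundo_impar := by
  intro vector _
  unfold Spec_encontrar_segundo_impar encontrar_segundo_impar
  exact (pvGoA_eq vector).1
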